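-- pv_equiv track=rewrite | github.com/yasufumi-nakata/Pytra | src/toolchain/resolve/py/resolver.py | _resolve_split_union_members
-- ===== SOURCE A (Python) =====
-- def _resolve_split_union_members(type_name: str) -> list[str]:
--     parts: list[str] = []
--     cur: list[str] = []
--     depth = 0
--     for ch in type_name:
--         if ch == "[":
--             depth += 1
--             cur.append(ch)
--         elif ch == "]":
--             if depth > 0:
--                 depth -= 1
--             cur.append(ch)
--         elif ch == "|" and depth == 0:
--             part = "".join(cur).strip()
--             if part != "":
--                 parts.append(part)
--             cur = []
--         else:
--             cur.append(ch)
--     tail = "".join(cur).strip()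
--     if tail != "":
--         parts.append(tail)
--     return parts
-- ===== SOURCE B (Python) =====
-- def _resolve_split_union_members(type_name: str) -> list[str]:
--     pipes = _top_level_pipes(type_name)
--     starts = [0] + [i + 1 for i in pipes]
--     ends = pipes + [len(type_name)]
--     segs = (type_name[a:b].strip() for a, b in zip(starts, ends))
--     return [s for s in segs if s != ""]
--
--
-- def _top_level_pipes(type_name: str) -> list[int]:
--     pipes = []
--     depth = 0
--     for i, ch in enumerate(type_name):
--         if ch == "[":
--             depth += 1
--         elif ch == "]":
--             if depth > 0:
--                 depth -= 1
--         elif ch == "|" and depth == 0: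
--             pipes.append(i)
--     return pipes
-- ===== Notes on version B (the rewrite author's own statement) =====
-- stated objective: alternative
-- what changed: A accumulates a running character buffer and flushes it at each top-level '|'; B first collects the indices of all top-level pipes in one pass, then builds the result in a second pass by slicing the string between consecutive boundaries, stripping each slice and dropping empties.
import Mathlib
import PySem

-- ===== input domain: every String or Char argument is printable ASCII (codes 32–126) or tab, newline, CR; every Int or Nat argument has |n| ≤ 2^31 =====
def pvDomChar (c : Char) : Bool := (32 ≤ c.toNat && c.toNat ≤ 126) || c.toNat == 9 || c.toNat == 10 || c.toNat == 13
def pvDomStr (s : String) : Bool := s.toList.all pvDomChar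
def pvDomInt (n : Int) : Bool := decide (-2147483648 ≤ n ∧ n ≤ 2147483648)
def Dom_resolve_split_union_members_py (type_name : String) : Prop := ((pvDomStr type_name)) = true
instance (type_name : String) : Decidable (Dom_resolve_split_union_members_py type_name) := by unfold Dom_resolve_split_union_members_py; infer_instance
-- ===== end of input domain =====

-- B rewrites A's single buffer-accumulating scan as two passes: collect the indices of
-- top-level '|', then build the result by slicing between consecutive boundaries (objective: alternative decomposition).

-- ===== PORT A =====
-- the for-loop of A as structural recursion over the characters, state (parts, cur, depth)
def pvAgo : List Char → List (List Char) → List Char → Nat → List (List Char)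
  | [], parts, cur, _ =>
      let tail := PySem.Chars.strip cur
      if tail ≠ [] then parts ++ [tail] else parts
  | ch :: rest, parts, cur, depth =>
      if ch = '[' then pvAgo rest parts (cur ++ [ch]) (depth + 1)
      else if ch = ']' then pvAgo rest parts (cur ++ [ch]) (if 0 < depth then depth - 1 else depth)
      else if ch = '|' ∧ depth = 0 then
        let part := PySem.Chars.strip cur
        pvAgo rest (if part ≠ [] then parts ++ [part] else parts) [] depth
      else pvAgo rest parts (cur ++ [ch]) depth

def resolve_split_union_members_py (type_name : String) : List String :=
  (pvAgo type_name.toList [] [] 0).map String.ofList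

-- ===== PORT B =====
-- first pass: indices of top-level '|' (i = current index, depth = bracket depth)
def pvPipes : List Char → Nat → Nat → List Nat
  | [], _, _ => []
  | ch :: rest, i, depth =>
      if ch = '[' then pvPipes rest (i + 1) (depth + 1)
      else if ch = ']' then pvPipes rest (i + 1) (if 0 < depth then depth - 1 else depth)
      else if ch = '|' ∧ depth = 0 then i :: pvPipes rest (i + 1) depth
      else pvPipes rest (i + 1) depth

def resolve_split_union_members_py_alt (type_name : String) : List String :=
  let cs := type_name.toList
  let pipes := pvPipes cs 0 0
  let starts := 0 :: pipes.map (· + 1)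
  let ends := pipes ++ [cs.length]
  ((((starts.zip ends).map
      (fun p => PySem.Chars.strip ((cs.drop p.1).take (p.2 - p.1)))).filter
      (· ≠ [])).map String.ofList)

-- ===== PRECONDITION & SPEC =====
def Spec_resolve_split_union_members_py (type_name : String) (out : List String) : Prop := out = resolve_split_union_members_py_alt type_name
instance (type_name : String) (out : List String) : Decidable (Spec_resolve_split_union_members_py type_name out) := by unfold Spec_resolve_split_union_members_py; infer_instance

-- ===== CLAIM (what is proved, stated in full; the proofs are below) =====
def Claim_equal_resolve_split_union_members_py : Prop := ∀ (type_name : String), Dom_resolve_split_union_members_py type_name → Spec_resolve_split_union_members_py type_name (resolve_split_union_members_py type_name)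

-- ===== LEMMAS AND PROOFS =====

-- apply f to the head of a list only
def pvMapHead (f : List Char → List Char) : List (List Char) → List (List Char)
  | [] => []
  | x :: xs => f x :: xs

-- canonical decomposition of a char list into top-level-pipe-separated chunks
def pvChunks : List Char → Nat → List (List Char)
  | [], _ => [[]]
  | ch :: rest, depth =>
      if ch = '[' then pvMapHead (ch :: ·) (pvChunks rest (depth + 1))
      else if ch = ']' then pvMapHead (ch :: ·) (pvChunks rest (if 0 < depth then depth - 1 else depth))
      else if ch = '|' ∧ depth = 0 then [] :: pvChunks rest depth
      else pvMapHead (ch :: ·) (pvChunks rest depth)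

-- A's scan in terms of pvChunks
lemma pvMapHead_snoc (cur : List Char) (ch : Char) (l : List (List Char)) :
    pvMapHead (fun x => (cur ++ [ch]) ++ x) l = pvMapHead (fun x => cur ++ x) (pvMapHead (ch :: ·) l) := by
  cases l <;> simp [pvMapHead]

lemma pvMapHead_nil_append (l : List (List Char)) :
    pvMapHead (fun x => [] ++ x) l = l := by
  cases l <;> simp [pvMapHead]

lemma pvAgo_eq_chunks (rest : List Char) :
    ∀ (parts : List (List Char)) (cur : List Char) (depth : Nat),
    pvAgo rest parts cur depth =
      parts ++ ((pvMapHead (fun x => cur ++ x) (pvChunks rest depth)).map PySem.Chars.strip).filter (· ≠ []) := by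
  induction rest with
  | nil =>
      intro parts cur depth
      simp only [pvAgo, pvChunks, pvMapHead, List.map, List.filter, List.append_nil]
      by_cases h : PySem.Chars.strip cur = [] <;> simp [h]
  | cons ch rest ih =>
      intro parts cur depth
      simp only [pvAgo, pvChunks]
      by_cases h1 : ch = '['
      · rw [if_pos h1, if_pos h1, ih, pvMapHead_snoc]
      · rw [if_neg h1, if_neg h1]
        by_cases h2 : ch = ']'
        · rw [if_pos h2, if_pos h2, ih, pvMapHead_snoc]
        · rw [if_neg h2, if_neg h2]
          by_cases h3 : ch = '|' ∧ depth = 0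
          · rw [if_pos h3, if_pos h3, ih, pvMapHead_nil_append]
            cases pvChunks rest depth with
            | nil => by_cases h : PySem.Chars.strip cur = [] <;> simp [pvMapHead, h]
            | cons y ys =>
                simp only [pvMapHead, List.map, List.filter, List.append_nil]
                by_cases h : PySem.Chars.strip cur = [] <;> simp [h, List.append_assoc]
          · rw [if_neg h3, if_neg h3, ih, pvMapHead_snoc]

lemma pvPipes_ge (rest : List Char) :
    ∀ (i depth : Nat), ∀ p ∈ pvPipes rest i depth, i ≤ p := by
  induction rest with
  | nil => intro i depth p hp; simp [pvPipes] at hp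
  | cons ch rest ih =>
      intro i depth p hp
      simp only [pvPipes] at hp
      by_cases h1 : ch = '['
      · rw [if_pos h1] at hp; exact le_trans (Nat.le_succ i) (ih _ _ p hp)
      · rw [if_neg h1] at hp
        by_cases h2 : ch = ']'
        · rw [if_pos h2] at hp; exact le_trans (Nat.le_succ i) (ih _ _ p hp)
        · rw [if_neg h2] at hp
          by_cases h3 : ch = '|' ∧ depth = 0
          · rw [if_pos h3] at hp
            rcases List.mem_cons.mp hp with h | h
            · omega
            · exact le_trans (Nat.le_succ i) (ih _ _ p h)
          · rw [if_neg h3] at hp; exact le_trans (Nat.le_succ i) (ih _ _ p hp)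

-- the zip-of-boundaries slicing, as a recursion on the pipe list
def pvSegs (cs : List Char) : Nat → List Nat → List (List Char)
  | start, [] => [(cs.drop start).take (cs.length - start)]
  | start, p :: ps => (cs.drop start).take (p - start) :: pvSegs cs (p + 1) ps

lemma pvZip_eq_segs (cs : List Char) (ps : List Nat) :
    ∀ (start : Nat),
    ((start :: ps.map (· + 1)).zip (ps ++ [cs.length])).map
        (fun p => (cs.drop p.1).take (p.2 - p.1)) =
      pvSegs cs start ps := by
  induction ps with
  | nil => intro start; simp [pvSegs]
  | cons p ps ih => intro start; simp only [List.map, List.cons_append, List.zip_cons_cons,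
      pvSegs, ← ih (p + 1)]

-- prepending one char shifts every segment boundary by one and only changes the head slice
lemma pvSegs_cons (ch : Char) (cs : List Char) (ps : List Nat) (i : Nat)
    (hdrop : cs.drop i = ch :: cs.drop (i + 1)) (hi : i < cs.length)
    (hge : ∀ p ∈ ps, i + 1 ≤ p) :
    pvSegs cs i ps = pvMapHead (ch :: ·) (pvSegs cs (i + 1) ps) := by
  cases ps with
  | nil =>
      simp only [pvSegs, pvMapHead, hdrop]
      have : cs.length - i = (cs.length - (i + 1)) + 1 := by omega
      rw [this, List.take_succ_cons]
  | cons p ps =>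
      have hp : i + 1 ≤ p := hge p (List.mem_cons_self ..)
      simp only [pvSegs, pvMapHead, hdrop]
      have : p - i = (p - (i + 1)) + 1 := by omega
      rw [this, List.take_succ_cons]

lemma pvSegs_eq_chunks (cs : List Char) (rest : List Char) :
    ∀ (i depth : Nat), cs.drop i = rest →
    pvSegs cs i (pvPipes rest i depth) = pvChunks rest depth := by
  induction rest with
  | nil =>
      intro i depth h
      have hi : cs.length ≤ i := List.drop_eq_nil_iff.mp h
      simp [pvPipes, pvSegs, pvChunks, h, Nat.sub_eq_zero_of_le hi]
  | cons ch rest ih =>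
      intro i depth h
      have hi : i < cs.length := by
        by_contra hge
        rw [List.drop_eq_nil_of_le (by omega)] at h
        simp at h
      have hdrop1 : cs.drop (i + 1) = rest := by
        rw [← List.tail_drop, h, List.tail_cons]
      have hdrop : cs.drop i = ch :: cs.drop (i + 1) := by rw [hdrop1, h]
      simp only [pvPipes, pvChunks]
      by_cases h1 : ch = '['
      · rw [if_pos h1, if_pos h1,
          pvSegs_cons ch cs _ i hdrop hi (pvPipes_ge rest (i+1) _), ih (i+1) _ hdrop1]
      · rw [if_neg h1, if_neg h1]
        by_cases h2 : ch = ']'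
        · rw [if_pos h2, if_pos h2,
            pvSegs_cons ch cs _ i hdrop hi (pvPipes_ge rest (i+1) _), ih (i+1) _ hdrop1]
        · rw [if_neg h2, if_neg h2]
          by_cases h3 : ch = '|' ∧ depth = 0
          · rw [if_pos h3, if_pos h3]
            simp only [pvSegs, Nat.sub_self, List.take_zero]
            rw [ih (i+1) depth hdrop1]
          · rw [if_neg h3, if_neg h3,
              pvSegs_cons ch cs _ i hdrop hi (pvPipes_ge rest (i+1) _), ih (i+1) _ hdrop1]

-- ===== VERDICT (by name: the statement is the Claim_ definition above) =====
theorem resolve_split_union_members_py_spec : Claim_equal_resolve_split_union_members_py := by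
  intro type_name _
  unfold Spec_resolve_split_union_members_py resolve_split_union_members_py
  rw [pvAgo_eq_chunks, pvMapHead_nil_append, List.nil_append]
  dsimp only [resolve_split_union_members_py_alt]
  rw [show (fun p : Nat × Nat => PySem.Chars.strip ((type_name.toList.drop p.1).take (p.2 - p.1)))
        = (PySem.Chars.strip ∘ fun p : Nat × Nat => (type_name.toList.drop p.1).take (p.2 - p.1)) from rfl,
    ← List.map_map, pvZip_eq_segs, pvSegs_eq_chunks type_name.toList type_name.toList 0 0 (by simp)]
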